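-- pv_equiv track=rewrite | github.com/HugoPhi/autoFlex | search/plot_single_query_pruning.py | _pick_prune_hints
-- ===== SOURCE A (Python) =====
-- from collections import defaultdict, deque
-- from typing import Dict, List, Optional, Sequence, Set, Tuple
--
-- def _bfs_dist(start: str, graph: Dict[str, Set[str]]) -> Dict[str, int]:
--     dist: Dict[str, int] = {start: 0}
--     q = deque([start])
--     while q:
--         u = q.popleft()
--         for v in graph.get(u, set()):
--             if v in dist:
--                 continue
--             dist[v] = dist[u] + 1
--             q.append(v)
--     return dist
--
-- def _pick_prune_hints(
--     query_node: str,
--     sparse_edges: Sequence[Tuple[str, str]],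
-- ) -> Tuple[str, str]:
--     succ: Dict[str, Set[str]] = defaultdict(set)
--     pred: Dict[str, Set[str]] = defaultdict(set)
--     for s, d in sparse_edges:
--         succ[s].add(d)
--         pred[d].add(s)
--
--     dist_from_query = _bfs_dist(query_node, succ)
--     dist_to_query = _bfs_dist(query_node, pred)
--
--     desc_candidates = [n for n, d in dist_from_query.items() if n != query_node and d > 0]
--     anc_candidates = [n for n, d in dist_to_query.items() if n != query_node and d > 0]
--
--     desc_hint = query_node
--     anc_hint = query_node
--     if desc_candidates:
--         # Keep the hint close to query so the directional dashed line stays inside panel bounds.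
--         desc_hint = sorted(desc_candidates, key=lambda n: (dist_from_query[n], n))[0]
--     if anc_candidates:
--         anc_hint = sorted(anc_candidates, key=lambda n: (dist_to_query[n], n))[0]
--
--     return anc_hint, desc_hint
-- ===== SOURCE B (Python) =====
-- def _pick_prune_hints(query_node, sparse_edges):
--     # The nearest candidate in each BFS direction is always at distance 1, so
--     # a single scan of the edge list suffices: no adjacency maps, no BFS.
--     succs = {d for s, d in sparse_edges if s == query_node and d != query_node}
--     preds = {s for s, d in sparse_edges if d == query_node and s != query_node}
--     anc_hint = min(preds) if preds else query_node
--     desc_hint = min(succs) if succs else query_node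
--     return anc_hint, desc_hint
-- ===== Notes on version B (the rewrite author's own statement) =====
-- stated objective: simpler
-- what changed: B drops the adjacency-map construction, the two BFS traversals and the (dist, name)-keyed sorts: the nearest hint in each direction is always a direct neighbour of the query node, so B takes the lexicographic min of the direct successors/predecessors collected in a single scan of the edge list (self-loops excluded), falling back to query_node.
import Mathlib
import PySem

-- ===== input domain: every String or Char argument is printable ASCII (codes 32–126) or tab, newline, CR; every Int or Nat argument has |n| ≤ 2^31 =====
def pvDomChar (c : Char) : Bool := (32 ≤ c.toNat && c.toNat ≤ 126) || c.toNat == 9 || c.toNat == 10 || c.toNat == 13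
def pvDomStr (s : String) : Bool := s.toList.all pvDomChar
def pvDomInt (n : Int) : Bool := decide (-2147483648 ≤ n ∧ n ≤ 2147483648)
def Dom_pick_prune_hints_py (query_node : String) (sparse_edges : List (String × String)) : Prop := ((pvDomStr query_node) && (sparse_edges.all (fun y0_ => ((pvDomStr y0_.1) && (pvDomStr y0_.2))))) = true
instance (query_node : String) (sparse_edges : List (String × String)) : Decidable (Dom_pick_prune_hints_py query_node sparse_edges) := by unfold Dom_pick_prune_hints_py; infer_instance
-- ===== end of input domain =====

-- B replaces the two BFS passes and sorts of A by one scan of the edge list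
-- (the nearest hint in each direction is a direct neighbour of the query node).

-- ===== PORT A =====

-- `for s, d in sparse_edges: succ[s].add(d); pred[d].add(s)` over (succ, pred)
def pvBuildGraphs (sparse_edges : List (String × String)) :
    PySem.Dict String (PySem.Set String) × PySem.Dict String (PySem.Set String) :=
  sparse_edges.foldl
    (fun sp e =>
      (sp.1.modify e.1 [] (fun S => PySem.Set.add S e.2),
       sp.2.modify e.2 [] (fun S => PySem.Set.add S e.1)))
    (PySem.Dict.empty, PySem.Dict.empty)

-- the `while q:` loop of _bfs_dist; fuel bounds the number of pops (each pop was a push,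
-- and pushes after the first are distinct new dict keys drawn from the value sets of the
-- graph, so `1 + Σ |value set|` pops can never be exceeded — fuel 0 is unreachable)
def pvBfsLoop : Nat → PySem.Dict String (PySem.Set String) →
    PySem.Dict String Int → List String → PySem.Dict String Int
  | 0, _, dist, _ => dist
  | _ + 1, _, dist, [] => dist
  | fuel + 1, graph, dist, u :: q =>
      -- `for v in graph.get(u, set()): if v in dist: continue; dist[v] = dist[u] + 1; q.append(v)`
      let st := (graph.getD u []).foldl
        (fun (st : PySem.Dict String Int × List String) v =>
          if st.1.contains v then st
          else (st.1.insert v ((st.1.get? u).getD 0 + 1), st.2 ++ [v]))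
        (dist, q)
      pvBfsLoop fuel graph st.1 st.2

def pvBfsDist (start : String) (graph : PySem.Dict String (PySem.Set String)) :
    PySem.Dict String Int :=
  pvBfsLoop ((graph.values.map List.length).sum + 1) graph
    (PySem.Dict.empty.insert start 0) [start]

def pick_prune_hints_py (query_node : String) (sparse_edges : List (String × String)) : String × String :=
  let sp := pvBuildGraphs sparse_edges
  let dist_from_query := pvBfsDist query_node sp.1
  let dist_to_query := pvBfsDist query_node sp.2
  let desc_candidates := (dist_from_query.items.filter
      (fun p => !(p.1 == query_node) && decide (0 < p.2))).map (·.1)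
  let anc_candidates := (dist_to_query.items.filter
      (fun p => !(p.1 == query_node) && decide (0 < p.2))).map (·.1)
  -- `sorted(cands, key=lambda n: (dist[n], n))[0]` ([0] of the guarded non-empty list = headD;
  -- dist[n] exists for every candidate, so `(get? n).getD 0` is exact)
  let desc_hint := if desc_candidates.isEmpty then query_node
    else (PySem.List.sorted2 desc_candidates
      (fun n => (dist_from_query.get? n).getD 0) (fun n => n)).headD query_node
  let anc_hint := if anc_candidates.isEmpty then query_node
    else (PySem.List.sorted2 anc_candidates
      (fun n => (dist_to_query.get? n).getD 0) (fun n => n)).headD query_node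
  (anc_hint, desc_hint)

-- ===== PORT B =====
def pick_prune_hints_py_alt (query_node : String) (sparse_edges : List (String × String)) : String × String :=
  let succs : PySem.Set String := PySem.Set.ofList
    ((sparse_edges.filter (fun e => e.1 == query_node && !(e.2 == query_node))).map (·.2))
  let preds : PySem.Set String := PySem.Set.ofList
    ((sparse_edges.filter (fun e => e.2 == query_node && !(e.1 == query_node))).map (·.1))
  let anc_hint := match PySem.List.min? preds (fun x => x) with
    | some m => m
    | none => query_node
  let desc_hint := match PySem.List.min? succs (fun x => x) with
    | some m => m
    | none => query_node
  (anc_hint, desc_hint)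

-- ===== PRECONDITION & SPEC =====
def Spec_pick_prune_hints_py (query_node : String) (sparse_edges : List (String × String)) (out : String × String) : Prop := out = pick_prune_hints_py_alt query_node sparse_edges
instance (query_node : String) (sparse_edges : List (String × String)) (out : String × String) : Decidable (Spec_pick_prune_hints_py query_node sparse_edges out) := by unfold Spec_pick_prune_hints_py; infer_instance

-- ===== CLAIM (what is proved, stated in full; the proofs are below) =====
def Claim_equal_pick_prune_hints_py : Prop := ∀ (query_node : String) (sparse_edges : List (String × String)), Dom_pick_prune_hints_py query_node sparse_edges → Spec_pick_prune_hints_py query_node sparse_edges (pick_prune_hints_py query_node sparse_edges)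

-- ===== LEMMAS AND PROOFS =====

-- a foldl that updates the two components of a pair independently is the pair of the foldls
theorem pv_foldl_pair {E A B : Type} (f : A → E → A) (g : B → E → B) :
    ∀ (l : List E) (a : A) (b : B),
      l.foldl (fun p e => (f p.1 e, g p.2 e)) (a, b) = (l.foldl f a, l.foldl g b) := by
  intro l
  induction l with
  | nil => intro a b; rfl
  | cons e l ih => intro a b; simpa using ih (f a e) (g b e)

-- the value sets of the built graph: `d[f e].add(g e)` over the list, read at key c
theorem pv_getD_build (f g : (String × String) → String) :
    ∀ (l : List (String × String)) (d : PySem.Dict String (PySem.Set String)) (c : String),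
      (l.foldl (fun d e => d.modify (f e) [] (fun S => PySem.Set.add S (g e))) d).getD c []
        = PySem.Set.update (d.getD c []) ((l.filter (fun e => f e == c)).map g) := by
  intro l
  induction l with
  | nil => intro d c; simp [PySem.Set.update_nil]
  | cons e l ih =>
    intro d c
    simp only [List.foldl_cons, List.filter_cons]
    by_cases hc : f e = c
    · rw [ih, PySem.Dict.getD_modify]
      simp [hc, ← PySem.Set.update_cons]
    · rw [ih, PySem.Dict.getD_modify, if_neg (fun h => hc h.symm)]
      simp [hc]

-- elements inserted into a dict stay, others are untouched: the inner `for v in graph[u]` loop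
theorem pv_inner_loop (u : String) :
    ∀ (ns : List String), ns.Nodup →
      ∀ (d : PySem.Dict String Int) (q : List String),
        d.keys.Nodup → d.contains u = true →
        (ns.foldl
          (fun (st : PySem.Dict String Int × List String) v =>
            if st.1.contains v then st
            else (st.1.insert v ((st.1.get? u).getD 0 + 1), st.2 ++ [v])) (d, q)).2
            = q ++ ns.filter (fun v => !d.contains v) ∧
        (∀ x, (ns.foldl
          (fun (st : PySem.Dict String Int × List String) v =>
            if st.1.contains v then st
            else (st.1.insert v ((st.1.get? u).getD 0 + 1), st.2 ++ [v])) (d, q)).1.get? x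
            = if x ∈ ns ∧ d.contains x = false then some ((d.get? u).getD 0 + 1) else d.get? x) ∧
        (ns.foldl
          (fun (st : PySem.Dict String Int × List String) v =>
            if st.1.contains v then st
            else (st.1.insert v ((st.1.get? u).getD 0 + 1), st.2 ++ [v])) (d, q)).1.keys.Nodup := by
  intro ns
  induction ns with
  | nil => intro _ d q hnd _; simpa using hnd
  | cons v ns ih =>
    intro hnodup d q hnd hu
    obtain ⟨hv, hns⟩ := List.nodup_cons.mp hnodup
    simp only [List.foldl_cons]
    by_cases hcv : d.contains v = true
    · rw [if_pos hcv]
      obtain ⟨h2, h1, h3⟩ := ih hns d q hnd hu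
      refine ⟨?_, ?_, h3⟩
      · rw [h2, List.filter_cons, hcv]; simp
      · intro x
        rw [h1 x]
        by_cases hxv : x = v
        · subst hxv; simp [hcv]
        · simp [hxv]
    · replace hcv : d.contains v = false := Bool.not_eq_true _ ▸ (by simpa using hcv)
      rw [if_neg (by simp [hcv])]
      have hvu : v ≠ u := fun h => by rw [h, hu] at hcv; exact Bool.true_eq_false.mp hcv
      have hnd2 : (d.insert v ((d.get? u).getD 0 + 1)).keys.Nodup :=
        PySem.Dict.nodup_keys_insert _ _ _ hnd
      have hu2 : (d.insert v ((d.get? u).getD 0 + 1)).contains u = true := by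
        rw [PySem.Dict.contains_insert]; simp [hu]
      have hgu : (d.insert v ((d.get? u).getD 0 + 1)).get? u = d.get? u :=
        PySem.Dict.get?_insert_of_ne _ _ (fun h => hvu h.symm)
      obtain ⟨h2, h1, h3⟩ := ih hns (d.insert v ((d.get? u).getD 0 + 1)) (q ++ [v]) hnd2 hu2
      refine ⟨?_, ?_, h3⟩
      · rw [h2, List.filter_cons]
        have : ∀ x ∈ ns, (!(d.insert v ((d.get? u).getD 0 + 1)).contains x) = (!d.contains x) := by
          intro x hx
          rw [PySem.Dict.contains_insert]
          have hxv : (x == v) = false := by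
            simp only [beq_eq_false_iff_ne, ne_eq]
            exact fun h => hv (h ▸ hx)
          simp [hxv]
        rw [List.filter_congr this]
        simp [hcv]
      · intro x
        rw [h1 x, hgu]
        by_cases hxv : x = v
        · subst hxv
          rw [if_neg (by simp [hv]), PySem.Dict.get?_insert_self,
            if_pos ⟨List.mem_cons_self, hcv⟩]
        · rw [PySem.Dict.get?_insert_of_ne _ _ hxv, PySem.Dict.contains_insert]
          have hbx : (x == v) = false := by simp [hxv]
          simp only [hbx, Bool.false_or]
          by_cases hmem : x ∈ ns
          · simp [hmem, hxv]
          · have : x ∈ v :: ns ↔ x ∈ ns := by simp [hxv]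
            simp [hmem, this]

-- the BFS loop: keys stay Nodup, existing entries are never changed, and every new entry
-- is strictly deeper than the bound c on the queue
theorem pv_loop_main (graph : PySem.Dict String (PySem.Set String))
    (hvals : ∀ u, (graph.getD u []).Nodup) (c : Int) :
    ∀ (fuel : Nat) (dist : PySem.Dict String Int) (q : List String),
      dist.keys.Nodup → (∀ u ∈ q, ∃ k, dist.get? u = some k ∧ c ≤ k) →
      (pvBfsLoop fuel graph dist q).keys.Nodup ∧
      ∀ x, (pvBfsLoop fuel graph dist q).get? x = dist.get? x ∨
        (dist.get? x = none ∧ ∃ k, (pvBfsLoop fuel graph dist q).get? x = some k ∧ c + 1 ≤ k) := by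
  intro fuel
  induction fuel with
  | zero =>
    intro dist q hnd _
    exact ⟨by simpa [pvBfsLoop] using hnd, fun x => Or.inl (by simp [pvBfsLoop])⟩
  | succ fuel ih =>
    intro dist q hnd hq
    cases q with
    | nil => exact ⟨by simpa [pvBfsLoop] using hnd, fun x => Or.inl (by simp [pvBfsLoop])⟩
    | cons u q' =>
      obtain ⟨ku, hku, hcku⟩ := hq u List.mem_cons_self
      have hcu : dist.contains u = true := by
        rw [PySem.Dict.contains_eq_isSome_get?, hku]; rfl
      obtain ⟨h2, h1, h3⟩ := pv_inner_loop u (graph.getD u []) (hvals u) dist q' hnd hcu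
      have hloop : pvBfsLoop (fuel + 1) graph dist (u :: q')
          = pvBfsLoop fuel graph
              ((graph.getD u []).foldl
                (fun (st : PySem.Dict String Int × List String) v =>
                  if st.1.contains v then st
                  else (st.1.insert v ((st.1.get? u).getD 0 + 1), st.2 ++ [v])) (dist, q')).1
              ((graph.getD u []).foldl
                (fun (st : PySem.Dict String Int × List String) v =>
                  if st.1.contains v then st
                  else (st.1.insert v ((st.1.get? u).getD 0 + 1), st.2 ++ [v])) (dist, q')).2 := rfl
      have hqnew : ∀ w ∈ ((graph.getD u []).foldl
          (fun (st : PySem.Dict String Int × List String) v =>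
            if st.1.contains v then st
            else (st.1.insert v ((st.1.get? u).getD 0 + 1), st.2 ++ [v])) (dist, q')).2,
          ∃ k, ((graph.getD u []).foldl
            (fun (st : PySem.Dict String Int × List String) v =>
              if st.1.contains v then st
              else (st.1.insert v ((st.1.get? u).getD 0 + 1), st.2 ++ [v])) (dist, q')).1.get? w
            = some k ∧ c ≤ k := by
        intro w hw
        rw [h2] at hw
        rcases List.mem_append.mp hw with hw | hw
        · obtain ⟨k, hk, hck⟩ := hq w (List.mem_cons_of_mem _ hw)
          refine ⟨k, ?_, hck⟩
          rw [h1 w, if_neg]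
          · exact hk
          · rintro ⟨-, hcw⟩
            rw [PySem.Dict.contains_eq_isSome_get?, hk] at hcw
            exact Bool.true_eq_false.mp hcw.symm.symm
        · obtain ⟨hwns, hwc⟩ := List.mem_filter.mp hw
          refine ⟨(dist.get? u).getD 0 + 1, ?_, ?_⟩
          · rw [h1 w, if_pos ⟨hwns, by simpa using hwc⟩]
          · rw [hku]; simpa using le_trans hcku (by omega)
      obtain ⟨H3, H1⟩ := ih ((graph.getD u []).foldl _ (dist, q')).1
        ((graph.getD u []).foldl _ (dist, q')).2 h3 hqnew
      rw [hloop]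
      refine ⟨H3, fun x => ?_⟩
      rcases H1 x with hx | ⟨hnone, k, hk, hck⟩
      · rw [hx, h1 x]
        by_cases hcond : x ∈ graph.getD u [] ∧ dist.contains x = false
        · rw [if_pos hcond]
          refine Or.inr ⟨?_, (dist.get? u).getD 0 + 1, rfl, ?_⟩
          · rcases hgx : dist.get? x with _ | k'
            · rfl
            · rw [PySem.Dict.contains_eq_isSome_get?, hgx] at hcond
              exact absurd hcond.2 (by simp)
          · rw [hku]; simpa using by omega
        · rw [if_neg hcond]; exact Or.inl rfl
      · rw [h1 x] at hnone
        by_cases hcond : x ∈ graph.getD u [] ∧ dist.contains x = false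
        · rw [if_pos hcond] at hnone; exact absurd hnone (by simp)
        · rw [if_neg hcond] at hnone
          exact Or.inr ⟨hnone, k, hk, hck⟩

-- the facts about the finished BFS dict that the equivalence needs
theorem pv_bfs_facts (graph : PySem.Dict String (PySem.Set String)) (start : String)
    (hvals : ∀ u, (graph.getD u []).Nodup) :
    (pvBfsDist start graph).keys.Nodup ∧
    (pvBfsDist start graph).get? start = some 0 ∧
    (∀ v, (pvBfsDist start graph).get? v = some 1 ↔ (v ∈ graph.getD start [] ∧ v ≠ start)) ∧
    (∀ n k, n ≠ start → (pvBfsDist start graph).get? n = some k → 1 ≤ k) ∧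
    ((∀ v ∈ graph.getD start [], v = start) →
      ∀ n k, (pvBfsDist start graph).get? n = some k → n = start) := by
  have hd0get : ∀ x, (PySem.Dict.empty.insert start (0 : Int)).get? x
      = if x = start then some 0 else none := by
    intro x
    rw [PySem.Dict.get?_insert]
    simp
  have hd0c : ∀ x, (PySem.Dict.empty.insert start (0 : Int)).contains x = (x == start) := by
    intro x
    rw [PySem.Dict.contains_insert]
    simp
  obtain ⟨h2, h1, h3⟩ := pv_inner_loop start (graph.getD start []) (hvals start)
    (PySem.Dict.empty.insert start 0) []
    (PySem.Dict.nodup_keys_insert _ _ _ PySem.Dict.nodup_keys_empty)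
    (PySem.Dict.contains_insert_self _ _ _)
  have h1' : ∀ x, ((graph.getD start []).foldl
      (fun (st : PySem.Dict String Int × List String) v =>
        if st.1.contains v then st
        else (st.1.insert v ((st.1.get? start).getD 0 + 1), st.2 ++ [v]))
      (PySem.Dict.empty.insert start 0, [])).1.get? x
      = if x ∈ graph.getD start [] ∧ x ≠ start then some 1
        else if x = start then some 0 else none := by
    intro x
    rw [h1 x]
    by_cases hx : x ∈ graph.getD start [] ∧ x ≠ start
    · rw [if_pos ⟨hx.1, by rw [hd0c]; simpa using hx.2⟩, if_pos hx, hd0get, if_pos rfl]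
      rfl
    · rw [if_neg (fun hc => hx ⟨hc.1, by
          have := hc.2
          rw [hd0c] at this
          simpa using this⟩),
        if_neg hx, hd0get]
  have hq1 : ∀ w ∈ ((graph.getD start []).foldl
      (fun (st : PySem.Dict String Int × List String) v =>
        if st.1.contains v then st
        else (st.1.insert v ((st.1.get? start).getD 0 + 1), st.2 ++ [v]))
      (PySem.Dict.empty.insert start 0, [])).2,
      ∃ k, ((graph.getD start []).foldl
        (fun (st : PySem.Dict String Int × List String) v =>
          if st.1.contains v then st
          else (st.1.insert v ((st.1.get? start).getD 0 + 1), st.2 ++ [v]))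
        (PySem.Dict.empty.insert start 0, [])).1.get? w = some k ∧ (1 : Int) ≤ k := by
    intro w hw
    rw [h2] at hw
    simp only [List.nil_append] at hw
    obtain ⟨hwns, hwc⟩ := List.mem_filter.mp hw
    have hwstart : w ≠ start := by
      rw [hd0c] at hwc; simpa using hwc
    exact ⟨1, by rw [h1' w, if_pos ⟨hwns, hwstart⟩], le_refl 1⟩
  obtain ⟨H3, H1⟩ := pv_loop_main graph hvals 1 ((graph.values.map List.length).sum)
    _ _ h3 hq1
  have hD : pvBfsDist start graph = pvBfsLoop ((graph.values.map List.length).sum) graph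
      ((graph.getD start []).foldl
        (fun (st : PySem.Dict String Int × List String) v =>
          if st.1.contains v then st
          else (st.1.insert v ((st.1.get? start).getD 0 + 1), st.2 ++ [v]))
        (PySem.Dict.empty.insert start 0, [])).1
      ((graph.getD start []).foldl
        (fun (st : PySem.Dict String Int × List String) v =>
          if st.1.contains v then st
          else (st.1.insert v ((st.1.get? start).getD 0 + 1), st.2 ++ [v]))
        (PySem.Dict.empty.insert start 0, [])).2 := rfl
  rw [hD]
  refine ⟨H3, ?_, ?_, ?_, ?_⟩
  · -- get? start = some 0
    rcases H1 start with hx | ⟨hnone, -⟩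
    · rw [hx, h1' start]
      simp
    · rw [h1' start] at hnone
      simp at hnone
  · -- some 1 ↔ direct neighbour
    intro v
    constructor
    · intro hv
      rcases H1 v with hx | ⟨-, k, hk, hck⟩
      · rw [hx, h1' v] at hv
        by_cases hc : v ∈ graph.getD start [] ∧ v ≠ start
        · exact hc
        · rw [if_neg hc] at hv
          by_cases hvs : v = start <;> simp [hvs] at hv
      · rw [hv] at hk
        obtain rfl : k = 1 := by exact (Option.some.injEq _ _ ▸ hk.symm : _)
        omega
    · intro hc
      rcases H1 v with hx | ⟨hnone, -⟩
      · rw [hx, h1' v, if_pos hc]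
      · rw [h1' v, if_pos hc] at hnone
        exact absurd hnone (by simp)
  · -- positive depth away from start
    intro n k hns hk
    rcases H1 n with hx | ⟨-, k', hk', hck'⟩
    · rw [hx, h1' n] at hk
      by_cases hc : n ∈ graph.getD start [] ∧ n ≠ start
      · rw [if_pos hc] at hk
        obtain rfl : (1 : Int) = k := by simpa using hk
        exact le_refl 1
      · rw [if_neg hc, if_neg hns] at hk
        exact absurd hk (by simp)
    · rw [hk] at hk'
      obtain rfl : k' = k := by simpa using hk'.symm
      omega
  · -- no neighbours: only start is a key
    intro hall n k hk
    have hfil : ((graph.getD start []).filter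
        (fun v => !(PySem.Dict.empty.insert start (0 : Int)).contains v)) = [] := by
      apply List.filter_eq_nil_iff.mpr
      intro v hv
      rw [hd0c, hall v hv]
      simp
    have hq2 : ((graph.getD start []).foldl
        (fun (st : PySem.Dict String Int × List String) v =>
          if st.1.contains v then st
          else (st.1.insert v ((st.1.get? start).getD 0 + 1), st.2 ++ [v]))
        (PySem.Dict.empty.insert start 0, [])).2 = [] := by
      rw [h2, hfil]
      rfl
    rw [hq2] at hk
    have hstop : ∀ (m : Nat) (dd : PySem.Dict String Int),
        pvBfsLoop m graph dd [] = dd := by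
      intro m dd; cases m <;> rfl
    rw [hstop] at hk
    rw [h1' n] at hk
    by_cases hc : n ∈ graph.getD start [] ∧ n ≠ start
    · exact absurd (hall n hc.1) hc.2
    · rw [if_neg hc] at hk
      by_cases hvs : n = start
      · exact hvs
      · rw [if_neg hvs] at hk
        exact absurd hk (by simp)

-- head of an insertBy-fold is before-minimal (before asymmetric, ¬before transitive)
theorem pv_insertBy_inv {α : Type} (before : α → α → Bool)
    (hasym : ∀ a b, before a b = true → before b a = false)
    (hneg : ∀ a b c, before a b = false → before b c = false → before a c = false)
    (x : α) (acc : List α)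
    (hinv : ∀ h t, acc = h :: t → ∀ y ∈ acc, before y h = false) :
    ∀ h t, PySem.List.insertBy before x acc = h :: t →
      ∀ y ∈ PySem.List.insertBy before x acc, before y h = false := by
  have hirr : ∀ a, before a a = false := by
    intro a
    cases h : before a a
    · rfl
    · have h2 := hasym a a h
      rw [h] at h2
      exact h2
  cases acc with
  | nil =>
    intro h t hres y hy
    rw [show PySem.List.insertBy before x [] = [x] from rfl] at hres hy
    injection hres with e1 e2
    rw [← e1]
    obtain rfl : y = x := by simpa using hy
    exact hirr _
  | cons a t0 =>
    by_cases hxa : before x a = true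
    · rw [show PySem.List.insertBy before x (a :: t0) = x :: a :: t0 from by
        simp [PySem.List.insertBy, hxa]]
      intro h t hres y hy
      injection hres with e1 e2
      rw [← e1]
      rcases List.mem_cons.mp hy with rfl | hy
      · exact hirr y
      · rcases List.mem_cons.mp hy with rfl | hy
        · exact hasym _ _ hxa
        · by_contra hyx
          replace hyx : before y x = true := by simpa using hyx
          have hya : before y a = false := hinv a t0 rfl y (List.mem_cons_of_mem _ hy)
          have hax : before a x = false := hasym _ _ hxa
          have : before y x = false := hneg _ _ _ hya hax
          rw [this] at hyx
          exact Bool.false_ne_true hyx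
    · replace hxa : before x a = false := by simpa using hxa
      rw [show PySem.List.insertBy before x (a :: t0) = a :: PySem.List.insertBy before x t0 from by
        simp [PySem.List.insertBy, hxa]]
      intro h t hres y hy
      injection hres with e1 e2
      rw [← e1]
      rcases List.mem_cons.mp hy with rfl | hy
      · exact hirr y
      · rcases (PySem.List.mem_insertBy before x y t0).mp hy with rfl | hy
        · exact hxa
        · exact hinv a t0 rfl y (List.mem_cons_of_mem _ hy)

theorem pv_foldl_insertBy_head {α : Type} (before : α → α → Bool)
    (hasym : ∀ a b, before a b = true → before b a = false)
    (hneg : ∀ a b c, before a b = false → before b c = false → before a c = false) :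
    ∀ (xs acc : List α), (∀ h t, acc = h :: t → ∀ y ∈ acc, before y h = false) →
      ∀ h t, xs.foldl (fun acc x => PySem.List.insertBy before x acc) acc = h :: t →
        ∀ y ∈ xs.foldl (fun acc x => PySem.List.insertBy before x acc) acc, before y h = false := by
  intro xs
  induction xs with
  | nil => intro acc hinv h t hres y hy; exact hinv h t hres y hy
  | cons x xs ih =>
    intro acc hinv h t hres y hy
    exact ih (PySem.List.insertBy before x acc)
      (pv_insertBy_inv before hasym hneg x acc hinv) h t hres y hy

-- the lexicographic strict order used by sorted2 is asymmetric and ¬-transitive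
theorem pv_lex_asym {α : Type} (k1 : α → Int) (k2 : α → String) (a b : α) :
    (decide (k1 a < k1 b) || (!decide (k1 b < k1 a) && decide (k2 a < k2 b))) = true →
    (decide (k1 b < k1 a) || (!decide (k1 a < k1 b) && decide (k2 b < k2 a))) = false := by
  intro h
  by_cases hA : k1 a < k1 b <;> by_cases hB : k1 b < k1 a <;>
    by_cases hC : k2 a < k2 b <;> by_cases hD : k2 b < k2 a <;>
    simp_all <;>
    first
      | exact absurd hB (lt_asymm hA)
      | exact absurd hD (lt_asymm hC)

theorem pv_lex_negtrans {α : Type} (k1 : α → Int) (k2 : α → String) (a b c : α) :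
    (decide (k1 a < k1 b) || (!decide (k1 b < k1 a) && decide (k2 a < k2 b))) = false →
    (decide (k1 b < k1 c) || (!decide (k1 c < k1 b) && decide (k2 b < k2 c))) = false →
    (decide (k1 a < k1 c) || (!decide (k1 c < k1 a) && decide (k2 a < k2 c))) = false := by
  intro h1 h2
  by_cases hAB : k1 a < k1 b <;> by_cases hBA : k1 b < k1 a <;>
    by_cases hBC : k1 b < k1 c <;> by_cases hCB : k1 c < k1 b <;>
    by_cases hAC : k1 a < k1 c <;> by_cases hCA : k1 c < k1 a <;>
    simp_all <;>
    first
      | omega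
      | (constructor <;> omega)
      | (exact fun h => absurd (lt_trans h1 h2) h)
      | (exact absurd (lt_trans h1 h2) (by omega))
      | exact lt_trans h1 h2
      | exact fun h => absurd h2 (not_lt_of_gt (lt_trans h h1))
      | exact le_trans h2 h1

-- one direction of the picture: A's candidate/sort/head block equals B's min-of-neighbours,
-- for any dict d with the BFS facts and any list S with the direct-neighbour membership
theorem pv_hint_core (d : PySem.Dict String Int) (start : String) (S : List String)
    (hnd : d.keys.Nodup)
    (h0 : d.get? start = some 0)
    (h1 : ∀ v, d.get? v = some 1 ↔ v ∈ S)
    (hemp : S = [] → ∀ n k, d.get? n = some k → n = start) :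
    (if ((d.items.filter (fun p => !(p.1 == start) && decide (0 < p.2))).map (·.1)).isEmpty
      then start
      else (PySem.List.sorted2
        ((d.items.filter (fun p => !(p.1 == start) && decide (0 < p.2))).map (·.1))
        (fun n => (d.get? n).getD 0) (fun n => n)).headD start)
    = (match PySem.List.min? S (fun x => x) with
        | some m => m
        | none => start) := by
  have mem_cands : ∀ n, (n ∈ (d.items.filter
      (fun p => !(p.1 == start) && decide (0 < p.2))).map (·.1))
      ↔ ∃ k, d.get? n = some k ∧ n ≠ start ∧ 0 < k := by
    intro n
    constructor
    · intro hn
      obtain ⟨p, hp, rfl⟩ := List.mem_map.mp hn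
      obtain ⟨hpi, hpred⟩ := List.mem_filter.mp hp
      simp only [Bool.and_eq_true, Bool.not_eq_true', beq_eq_false_iff_ne, ne_eq,
        decide_eq_true_eq] at hpred
      exact ⟨p.2, PySem.Dict.get?_of_mem_items d (by exact hpi) hnd, hpred.1, hpred.2⟩
    · rintro ⟨k, hk, hns, hkpos⟩
      refine List.mem_map.mpr ⟨(n, k), List.mem_filter.mpr
        ⟨PySem.Dict.mem_items_of_get?_eq_some d hk, ?_⟩, rfl⟩
      simp [hns, hkpos]
  by_cases hS : S = []
  · have hmin : PySem.List.min? S (fun x => x) = none :=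
      (PySem.List.min?_eq_none_iff _ _).mpr hS
    have hfil : d.items.filter (fun p => !(p.1 == start) && decide (0 < p.2)) = [] := by
      apply List.filter_eq_nil_iff.mpr
      intro p hp
      have := PySem.Dict.get?_of_mem_items d (k := p.1) (v := p.2) (by exact hp) hnd
      have hp1 : p.1 = start := hemp hS p.1 p.2 this
      simp [hp1]
    rw [hmin, hfil]
    simp
  · obtain ⟨m', hmin⟩ : ∃ m', PySem.List.min? S (fun x => x) = some m' := by
      cases h : PySem.List.min? S (fun x => x) with
      | none => rw [PySem.List.min?_eq_none_iff] at h; exact absurd h hS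
      | some m' => exact ⟨m', rfl⟩
    have hm'S : m' ∈ S := PySem.List.min?_mem hmin
    have hm'min : ∀ y ∈ S, m' ≤ y := PySem.List.min?_isMin hmin
    have get1 : d.get? m' = some 1 := (h1 m').mpr hm'S
    have hm'start : m' ≠ start := by
      intro e
      rw [e, h0] at get1
      exact absurd (Option.some.inj get1) (by norm_num)
    have hm'c : m' ∈ (d.items.filter
        (fun p => !(p.1 == start) && decide (0 < p.2))).map (·.1) :=
      (mem_cands m').mpr ⟨1, get1, hm'start, by norm_num⟩
    rw [hmin]
    rw [if_neg (by
      intro he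
      rw [List.isEmpty_iff] at he
      rw [he] at hm'c
      cases hm'c)]
    -- name the sorted list and its head
    cases hsrt : PySem.List.sorted2
        ((d.items.filter (fun p => !(p.1 == start) && decide (0 < p.2))).map (·.1))
        (fun n => (d.get? n).getD 0) (fun n => n) with
    | nil =>
      have := (PySem.List.sorted2_perm
        ((d.items.filter (fun p => !(p.1 == start) && decide (0 < p.2))).map (·.1))
        (fun n => (d.get? n).getD 0) (fun n => n) false)
      rw [hsrt] at this
      rw [this.symm.eq_nil] at hm'c
      cases hm'c
    | cons m t =>
      have hperm := (PySem.List.sorted2_perm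
        ((d.items.filter (fun p => !(p.1 == start) && decide (0 < p.2))).map (·.1))
        (fun n => (d.get? n).getD 0) (fun n => n) false)
      have hfold : ((d.items.filter (fun p => !(p.1 == start) && decide (0 < p.2))).map (·.1)).foldl
            (fun acc x => PySem.List.insertBy
              (fun a b => decide ((d.get? a).getD 0 < (d.get? b).getD 0) ||
                (!decide ((d.get? b).getD 0 < (d.get? a).getD 0) && decide (a < b))) x acc)
            [] = m :: t := hsrt
      have hbef := pv_foldl_insertBy_head
        (fun a b => decide ((d.get? a).getD 0 < (d.get? b).getD 0) ||
          (!decide ((d.get? b).getD 0 < (d.get? a).getD 0) && decide (a < b)))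
        (fun a b => pv_lex_asym (fun n => (d.get? n).getD 0) (fun n => n) a b)
        (fun a b c => pv_lex_negtrans (fun n => (d.get? n).getD 0) (fun n => n) a b c)
        ((d.items.filter (fun p => !(p.1 == start) && decide (0 < p.2))).map (·.1)) []
        (fun _ _ h => by cases h) m t hfold
      rw [hsrt] at hperm
      have hm_c : m ∈ (d.items.filter
          (fun p => !(p.1 == start) && decide (0 < p.2))).map (·.1) :=
        hperm.mem_iff.mp List.mem_cons_self
      obtain ⟨km, hgm, hmstart, hkmpos⟩ := (mem_cands m).mp hm_c
      have hbefm' : (decide ((d.get? m').getD 0 < (d.get? m).getD 0) ||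
          (!decide ((d.get? m).getD 0 < (d.get? m').getD 0) && decide (m' < m))) = false := by
        have := hbef m' (by rw [hfold]; exact hperm.mem_iff.mpr hm'c)
        exact this
      rw [get1, hgm] at hbefm'
      obtain ⟨hb1, hb2⟩ := Bool.or_eq_false_iff.mp hbefm'
      have hkm1 : km = 1 := by
        have h1km : ¬((1 : Int) < km) := by simpa using hb1
        omega
      rw [hkm1] at hb2
      have hnotlt : ¬(m' < m) := by
        rcases Bool.and_eq_false_iff.mp hb2 with hb | hb
        · exact absurd hb (by simp)
        · simpa using hb
      have hmS : m ∈ S := (h1 m).mp (by rw [hgm, hkm1])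
      have : m = m' := le_antisymm (not_lt.mp hnotlt) (hm'min m hmS)
      simpa using this

-- one direction (successors or predecessors): A's BFS + filter + sort + head block
-- equals B's min over the direct neighbours, for a graph keyed by f with values g
theorem pv_side (edges : List (String × String)) (q : String)
    (f g : (String × String) → String) :
    (if (((pvBfsDist q (edges.foldl
          (fun d e => d.modify (f e) [] (fun S => PySem.Set.add S (g e)))
          PySem.Dict.empty)).items.filter
        (fun p => !(p.1 == q) && decide (0 < p.2))).map (·.1)).isEmpty
      then q
      else (PySem.List.sorted2
        (((pvBfsDist q (edges.foldl
            (fun d e => d.modify (f e) [] (fun S => PySem.Set.add S (g e)))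
            PySem.Dict.empty)).items.filter
          (fun p => !(p.1 == q) && decide (0 < p.2))).map (·.1))
        (fun n => ((pvBfsDist q (edges.foldl
            (fun d e => d.modify (f e) [] (fun S => PySem.Set.add S (g e)))
            PySem.Dict.empty)).get? n).getD 0) (fun n => n)).headD q)
    = (match PySem.List.min?
        (PySem.Set.ofList ((edges.filter (fun e => f e == q && !(g e == q))).map g))
        (fun x => x) with
      | some m => m
      | none => q) := by
  have hvals : ∀ u, ((edges.foldl
      (fun d e => d.modify (f e) [] (fun S => PySem.Set.add S (g e)))
      PySem.Dict.empty).getD u []).Nodup := by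
    intro u
    rw [pv_getD_build, PySem.Dict.getD_empty, PySem.Set.update_nil_left]
    exact PySem.Set.nodup_ofList _
  obtain ⟨hnd, h0, h1g, _, hall⟩ := pv_bfs_facts (edges.foldl
    (fun d e => d.modify (f e) [] (fun S => PySem.Set.add S (g e)))
    PySem.Dict.empty) q hvals
  have hmemG : ∀ v, v ∈ (edges.foldl
      (fun d e => d.modify (f e) [] (fun S => PySem.Set.add S (g e)))
      PySem.Dict.empty).getD q [] ↔ ∃ e ∈ edges, f e = q ∧ g e = v := by
    intro v
    rw [pv_getD_build, PySem.Dict.getD_empty, PySem.Set.update_nil_left,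
      PySem.Set.mem_ofList]
    simp [and_assoc]
  have hmemS : ∀ v, v ∈ PySem.Set.ofList
      ((edges.filter (fun e => f e == q && !(g e == q))).map g)
      ↔ ∃ e ∈ edges, f e = q ∧ g e = v ∧ v ≠ q := by
    intro v
    rw [PySem.Set.mem_ofList]
    constructor
    · intro hv
      obtain ⟨e, he, rfl⟩ := List.mem_map.mp hv
      obtain ⟨he', hpred⟩ := List.mem_filter.mp he
      simp only [Bool.and_eq_true, beq_iff_eq, Bool.not_eq_true', beq_eq_false_iff_ne,
        ne_eq] at hpred
      exact ⟨e, he', hpred.1, rfl, hpred.2⟩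
    · rintro ⟨e, he, hfq, rfl, hne⟩
      exact List.mem_map.mpr ⟨e, List.mem_filter.mpr ⟨he, by simp [hfq, hne]⟩, rfl⟩
  have h1 : ∀ v, (pvBfsDist q (edges.foldl
      (fun d e => d.modify (f e) [] (fun S => PySem.Set.add S (g e)))
      PySem.Dict.empty)).get? v = some 1
      ↔ v ∈ PySem.Set.ofList ((edges.filter (fun e => f e == q && !(g e == q))).map g) := by
    intro v
    rw [h1g v, hmemS v, hmemG v]
    constructor
    · rintro ⟨⟨e, he, hfq, hgv⟩, hne⟩
      exact ⟨e, he, hfq, hgv, hne⟩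
    · rintro ⟨e, he, hfq, hgv, hne⟩
      exact ⟨⟨e, he, hfq, hgv⟩, hne⟩
  have hemp : PySem.Set.ofList ((edges.filter (fun e => f e == q && !(g e == q))).map g) = [] →
      ∀ n k, (pvBfsDist q (edges.foldl
        (fun d e => d.modify (f e) [] (fun S => PySem.Set.add S (g e)))
        PySem.Dict.empty)).get? n = some k → n = q := by
    intro hSnil
    apply hall
    intro v hv
    by_contra hne
    obtain ⟨e, he, hfq, hgv⟩ := (hmemG v).mp hv
    have : v ∈ PySem.Set.ofList ((edges.filter (fun e => f e == q && !(g e == q))).map g) :=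
      (hmemS v).mpr ⟨e, he, hfq, hgv, hne⟩
    rw [hSnil] at this
    cases this
  exact pv_hint_core _ q _ hnd h0 h1 hemp

-- ===== VERDICT (by name: the statement is the Claim_ definition above) =====
theorem pick_prune_hints_py_spec : Claim_equal_pick_prune_hints_py := by
  unfold Claim_equal_pick_prune_hints_py
  intro q edges _
  unfold Spec_pick_prune_hints_py
  simp only [pick_prune_hints_py, pick_prune_hints_py_alt, pvBuildGraphs]
  rw [show (edges.foldl
      (fun (sp : PySem.Dict String (PySem.Set String) × PySem.Dict String (PySem.Set String)) e =>
        (sp.1.modify e.1 [] (fun S => PySem.Set.add S e.2),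
         sp.2.modify e.2 [] (fun S => PySem.Set.add S e.1)))
      (PySem.Dict.empty, PySem.Dict.empty))
      = (edges.foldl (fun d e => d.modify e.1 [] (fun S => PySem.Set.add S e.2)) PySem.Dict.empty,
         edges.foldl (fun d e => d.modify e.2 [] (fun S => PySem.Set.add S e.1)) PySem.Dict.empty)
    from pv_foldl_pair
      (fun d (e : String × String) => PySem.Dict.modify d e.1 [] (fun S => PySem.Set.add S e.2))
      (fun d (e : String × String) => PySem.Dict.modify d e.2 [] (fun S => PySem.Set.add S e.1))
      edges PySem.Dict.empty PySem.Dict.empty]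
  simp only [Prod.mk.injEq]
  exact ⟨pv_side edges q (fun e => e.2) (fun e => e.1),
         pv_side edges q (fun e => e.1) (fun e => e.2)⟩
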